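-- pv_equiv track=rewrite | github.com/yeseong33/algorithm-study | 브루트 포스.py/분해합.py | hap
-- ===== SOURCE A (Python) =====
-- def hap(n):
--     for i in range(n):
--         k = 0
--         l = len(str(i))
--         for j in range(l):
--             k += int(str(i)[j])
--         k += i
--         if k == n:
--             return i
--     return 0
-- ===== SOURCE B (Python) =====
-- def hap(n):
--     # Any generator i of n satisfies i = n - digitsum(i) >= n - 9*len(str(n)),
--     # so only that window needs scanning.
--     lo = n - 9 * len(str(n))
--     if lo < 0:
--         lo = 0
--     for i in range(lo, n):
--         s, m = 0, i
--         while m: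
--             s += m % 10
--             m //= 10
--         if i + s == n:
--             return i
--     return 0
-- ===== Notes on version B (the rewrite author's own statement) =====
-- stated objective: faster
-- what changed: Instead of scanning every i in [0, n) and summing digits via string indexing, B scans only the window [max(0, n - 9*len(str(n))), n) (the only place a generator can live, since the digit sum is at most 9 per digit) and computes the digit sum arithmetically with mod/div.
import Mathlib
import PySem

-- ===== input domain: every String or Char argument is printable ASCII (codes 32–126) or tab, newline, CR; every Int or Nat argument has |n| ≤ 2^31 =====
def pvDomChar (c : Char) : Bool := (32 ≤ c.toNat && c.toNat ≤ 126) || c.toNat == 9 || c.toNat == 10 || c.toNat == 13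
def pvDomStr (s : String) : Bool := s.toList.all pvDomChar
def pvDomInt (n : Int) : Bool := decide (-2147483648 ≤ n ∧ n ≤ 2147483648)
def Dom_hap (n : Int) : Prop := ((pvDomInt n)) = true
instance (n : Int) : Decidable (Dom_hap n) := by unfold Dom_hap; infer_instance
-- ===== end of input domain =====

-- B replaces A's full scan of [0, n) with a scan of the only window a generator can
-- live in, [max(0, n - 9*len(str(n))), n), and sums digits arithmetically (faster).

-- ===== PORT A =====
-- 'for i in range(n): k = 0; l = len(str(i)); for j: k += int(str(i)[j]); k += i; if k == n: return i' ... 'return 0'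
-- str(i)[j] is always in range and a digit char (i ≥ 0), so the .getD defaults are never used.
def hapLoop (n : Int) : List Int → Int
  | [] => 0
  | i :: rest =>
    let k : Int := 0
    let s := PySem.Int.toChars i
    let l : Int := (s.length : Int)
    let k := (PySem.List.pyRange 0 l).foldl
      (fun k j => k + (PySem.Int.ofChars? [PySem.List.pyGetD s j ' ']).getD 0) k
    let k := k + i
    if k = n then i else hapLoop n rest

def hap (n : Int) : Int := hapLoop n (PySem.List.pyRange 0 n)

-- ===== PORT B =====
-- 'while m: s += m % 10; m //= 10' — inside hap_alt, m starts at i ≥ 0, so 'm ≠ 0' is '0 < m'.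
def digitSumAlt (m : Int) : Int :=
  if _h : 0 < m then PySem.Int.mod m 10 + digitSumAlt (PySem.Int.floordiv m 10)
  else 0
termination_by m.toNat
decreasing_by
  simp only [PySem.Int.floordiv]
  rw [Int.fdiv_eq_ediv]
  omega

def hapAltLoop (n : Int) : List Int → Int
  | [] => 0
  | i :: rest =>
    let s := digitSumAlt i
    if i + s = n then i else hapAltLoop n rest

-- len(str(n)) is ported as the length of PySem.Int.toChars n (= str(n) as a char list).
def hap_alt (n : Int) : Int :=
  let lo := n - 9 * ((PySem.Int.toChars n).length : Int)
  let lo := if lo < 0 then 0 else lo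
  hapAltLoop n (PySem.List.pyRange lo n)

-- ===== PRECONDITION & SPEC =====
def Spec_hap (n : Int) (out : Int) : Prop := out = hap_alt n
instance (n : Int) (out : Int) : Decidable (Spec_hap n out) := by unfold Spec_hap; infer_instance

-- ===== CLAIM (what is proved, stated in full; the proofs are below) =====
def Claim_equal_hap : Prop := ∀ (n : Int), Dom_hap n → Spec_hap n (hap n)

-- ===== LEMMAS AND PROOFS =====

-- int(c) for a single char, as A computes it
def pvVal (c : Char) : Int := (PySem.Int.ofChars? [c]).getD 0

theorem pvVal_digitChar (d : Nat) (hd : d < 10) : pvVal (Nat.digitChar d) = (d : Int) := by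
  interval_cases d <;> decide

-- Nat.toDigitsCore: accumulator splits off
theorem tdc_append (f : Nat) : ∀ (n : Nat) (acc : List Char),
    Nat.toDigitsCore 10 f n acc = Nat.toDigitsCore 10 f n [] ++ acc := by
  induction f with
  | zero => intro n acc; simp [Nat.toDigitsCore]
  | succ f ih =>
    intro n acc
    simp only [Nat.toDigitsCore]
    by_cases h : n / 10 = 0
    · simp [h]
    · simp only [h, if_false]
      rw [ih (n / 10) ((n % 10).digitChar :: acc), ih (n / 10) [(n % 10).digitChar]]
      simp

-- every char produced is a digitChar of a digit
theorem tdc_mem (f : Nat) : ∀ (n : Nat) (c : Char), c ∈ Nat.toDigitsCore 10 f n [] →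
    ∃ d, d < 10 ∧ c = Nat.digitChar d := by
  induction f with
  | zero => intro n c hc; simp [Nat.toDigitsCore] at hc
  | succ f ih =>
    intro n c hc
    simp only [Nat.toDigitsCore] at hc
    by_cases h : n / 10 = 0
    · simp [h] at hc
      exact ⟨n % 10, Nat.mod_lt _ (by norm_num), hc⟩
    · simp only [h, if_false] at hc
      rw [tdc_append] at hc
      rcases List.mem_append.1 hc with hc | hc
      · exact ih _ _ hc
      · simp at hc
        exact ⟨n % 10, Nat.mod_lt _ (by norm_num), hc⟩

-- the value is smaller than 10 ^ (number of chars produced)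
theorem tdc_lt (f : Nat) : ∀ (n : Nat), n < f → n < 10 ^ (Nat.toDigitsCore 10 f n []).length := by
  induction f with
  | zero => omega
  | succ f ih =>
    intro n hn
    simp only [Nat.toDigitsCore]
    by_cases h : n / 10 = 0
    · simp [h]
      omega
    · simp only [h, if_false]
      rw [Nat.toDigitsCore_lens_eq]
      have h1 : n / 10 < f := by omega
      have h2 := ih (n / 10) h1
      calc n < (n / 10 + 1) * 10 := by omega
        _ ≤ 10 ^ (Nat.toDigitsCore 10 f (n / 10) []).length * 10 := by
              have : n / 10 + 1 ≤ 10 ^ (Nat.toDigitsCore 10 f (n / 10) []).length := h2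
              exact Nat.mul_le_mul_right 10 this
        _ = 10 ^ ((Nat.toDigitsCore 10 f (n / 10) []).length + 1) := by ring

-- digit-sum of the produced chars = sum of Nat.digits
theorem tdc_sum (f : Nat) : ∀ (n : Nat), n < f →
    ((Nat.toDigitsCore 10 f n []).map pvVal).sum = ((Nat.digits 10 n).sum : Int) := by
  induction f with
  | zero => omega
  | succ f ih =>
    intro n hn
    simp only [Nat.toDigitsCore]
    by_cases h : n / 10 = 0
    · have hn10 : n < 10 := by omega
      simp [h, pvVal_digitChar (n % 10) (Nat.mod_lt _ (by norm_num))]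
      rcases Nat.eq_zero_or_pos n with h0 | h0
      · simp [h0]
      · rw [Nat.digits_def' (by norm_num : 1 < 10) h0, h]
        simp
    · simp only [h, if_false]
      rw [tdc_append]
      have h1 : n / 10 < f := by omega
      have h0 : 0 < n := by omega
      rw [Nat.digits_def' (by norm_num : 1 < 10) h0]
      simp [ih (n / 10) h1, pvVal_digitChar (n % 10) (Nat.mod_lt _ (by norm_num))]
      ring

theorem toDigits_sum (n : Nat) :
    ((Nat.toDigits 10 n).map pvVal).sum = ((Nat.digits 10 n).sum : Int) :=
  tdc_sum (n + 1) n (Nat.lt_succ_self n)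

theorem toDigits_lt (n : Nat) : n < 10 ^ (Nat.toDigits 10 n).length :=
  tdc_lt (n + 1) n (Nat.lt_succ_self n)

theorem toDigits_sum_le (n : Nat) :
    ((Nat.toDigits 10 n).map pvVal).sum ≤ 9 * ((Nat.toDigits 10 n).length : Int) := by
  have h := List.sum_le_card_nsmul ((Nat.toDigits 10 n).map pvVal) (9 : Int) ?_
  · simpa [nsmul_eq_mul, mul_comm] using h
  · intro x hx
    rcases List.mem_map.1 hx with ⟨c, hc, rfl⟩
    rcases tdc_mem (n + 1) n c hc with ⟨d, hd, rfl⟩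
    rw [pvVal_digitChar d hd]
    omega

theorem toDigits_len_pos (n : Nat) : 0 < (Nat.toDigits 10 n).length := by
  by_contra h
  have h0 : (Nat.toDigits 10 n).length = 0 := by omega
  have := toDigits_lt n
  rw [h0] at this
  simp at this
  -- n < 1 and also 1 ≤ 10 ^ 0 handled: n = 0 then toDigits 10 0 = ['0'] has length 1
  subst this
  have : Nat.toDigits 10 0 = ['0'] := by decide
  rw [this] at h0
  simp at h0

theorem toDigits_len_mono {i n : Nat} (h : i ≤ n) :
    (Nat.toDigits 10 i).length ≤ (Nat.toDigits 10 n).length :=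
  Nat.toDigits_length 10 i _ (toDigits_len_pos n) (lt_of_le_of_lt h (toDigits_lt n))

theorem digitSumAlt_eq (m : Int) (hm : 0 ≤ m) :
    digitSumAlt m = ((Nat.digits 10 m.toNat).sum : Int) := by
  generalize hk : m.toNat = k
  induction k using Nat.strong_induction_on generalizing m with
  | _ k ih =>
    rw [digitSumAlt]
    by_cases h : 0 < m
    · have hk0 : 0 < k := by omega
      have hdiv : PySem.Int.floordiv m 10 = m / 10 := by
        simp [PySem.Int.floordiv, Int.fdiv_eq_ediv]
      have hmod : PySem.Int.mod m 10 = m % 10 := by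
        simp [PySem.Int.mod, Int.fmod_eq_emod]
      rw [dif_pos h, hdiv, hmod, ih (k / 10) (by omega) (m / 10) (by omega) (by omega)]
      rw [Nat.digits_def' (by norm_num : 1 < 10) hk0]
      simp only [List.sum_cons]
      push_cast
      omega
    · have : k = 0 := by omega
      rw [dif_neg h, this]
      simp

-- A's inner loop equals B's arithmetic digit sum (for i ≥ 0)
theorem inner_eq (i : Int) (h : 0 ≤ i) :
    (PySem.List.pyRange 0 ((PySem.Int.toChars i).length : Int)).foldl
      (fun k j => k + (PySem.Int.ofChars? [PySem.List.pyGetD (PySem.Int.toChars i) j ' ']).getD 0) 0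
    = digitSumAlt i := by
  rw [PySem.List.foldl_pyRange_zero_pyGetD' (PySem.Int.toChars i) ' '
        (fun k c => k + (PySem.Int.ofChars? [c]).getD 0) 0,
      PySem.List.foldl_add]
  have htc : PySem.Int.toChars i = Nat.toDigits 10 i.toNat := by
    simp [PySem.Int.toChars, not_lt.2 h]
  rw [htc, digitSumAlt_eq i h]
  have := toDigits_sum i.toNat
  simpa [pvVal] using this

theorem hapLoop_eq_altLoop (n : Int) : ∀ (l : List Int), (∀ i ∈ l, 0 ≤ i) →
    hapLoop n l = hapAltLoop n l := by
  intro l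
  induction l with
  | nil => intro _; rfl
  | cons i rest ih =>
    intro hl
    have hi : 0 ≤ i := hl i (List.mem_cons_self ..)
    simp only [hapLoop, hapAltLoop, inner_eq i hi]
    rw [add_comm (digitSumAlt i) i]
    split_ifs with h
    · rfl
    · exact ih (fun j hj => hl j (List.mem_cons_of_mem _ hj))

theorem altLoop_skip (n : Int) : ∀ (l1 l2 : List Int), (∀ i ∈ l1, i + digitSumAlt i ≠ n) →
    hapAltLoop n (l1 ++ l2) = hapAltLoop n l2 := by
  intro l1
  induction l1 with
  | nil => intro l2 _; rfl
  | cons i rest ih =>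
    intro l2 hl
    simp only [List.cons_append, hapAltLoop]
    rw [if_neg (hl i (List.mem_cons_self ..))]
    exact ih l2 (fun j hj => hl j (List.mem_cons_of_mem _ hj))

-- below the window, i + digitsum(i) < n
theorem no_match_below (n i : Int) (hn : 0 < n) (hi0 : 0 ≤ i)
    (hi : i < n - 9 * ((PySem.Int.toChars n).length : Int)) :
    i + digitSumAlt i ≠ n := by
  have htc : PySem.Int.toChars n = Nat.toDigits 10 n.toNat := by
    simp [PySem.Int.toChars, not_lt.2 (le_of_lt hn)]
  have hds : digitSumAlt i ≤ 9 * ((Nat.toDigits 10 n.toNat).length : Int) := by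
    rw [digitSumAlt_eq i hi0, ← toDigits_sum i.toNat]
    calc ((Nat.toDigits 10 i.toNat).map pvVal).sum
        ≤ 9 * ((Nat.toDigits 10 i.toNat).length : Int) := toDigits_sum_le i.toNat
      _ ≤ 9 * ((Nat.toDigits 10 n.toNat).length : Int) := by
          have : i.toNat ≤ n.toNat := by omega
          have := toDigits_len_mono this
          omega
  rw [htc] at hi
  omega

-- ===== VERDICT (by name: the statement is the Claim_ definition above) =====
theorem hap_spec : Claim_equal_hap := by
  intro n _
  unfold Spec_hap hap hap_alt
  simp only
  have hL : 0 < ((PySem.Int.toChars n).length : Int) := by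
    by_cases h : n < 0
    · simp [PySem.Int.toChars, h]
    · have : PySem.Int.toChars n = Nat.toDigits 10 n.toNat := by
        simp [PySem.Int.toChars, h]
      rw [this]
      exact_mod_cast toDigits_len_pos n.toNat
  by_cases hn : n ≤ 0
  · -- both ranges are empty: A and B both return 0
    rw [if_pos (by omega : n - 9 * ((PySem.Int.toChars n).length : Int) < 0)]
    rw [PySem.List.pyRange_one_eq_nil hn]
    rfl
  · have hmem : ∀ i ∈ PySem.List.pyRange 0 n, (0:Int) ≤ i := by
      intro i hi
      exact (PySem.List.mem_pyRange_one.1 hi).1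
    rw [hapLoop_eq_altLoop n _ hmem]
    by_cases hneg : n - 9 * ((PySem.Int.toChars n).length : Int) < 0
    · rw [if_pos hneg]
    · rw [if_neg hneg]
      rw [PySem.List.pyRange_one_append 0 (n - 9 * ((PySem.Int.toChars n).length : Int)) n
            (by omega) (by omega)]
      apply altLoop_skip
      intro i hi
      rcases PySem.List.mem_pyRange_one.1 hi with ⟨hi0, hilt⟩
      exact no_match_below n i (by omega) hi0 hilt
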